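-- pv_equiv track=rewrite | github.com/gehuybre/geo-dash | archive/pattern_generator_v2.py | ascending_heights
-- ===== SOURCE A (Python) =====
-- def ascending_heights(start, end, count):
--     """Generate ascending height sequence (no repeats)"""
--     if count == 1:
--         return [start]
--     step = max(1, (end - start) // (count - 1))
--     heights = []
--     current = start
--     for _ in range(count):
--         heights.append(current)
--         current = min(current + step, end)
--     return heights
-- ===== SOURCE B (Python) =====
-- def ascending_heights(start, end, count):
--     """Generate ascending height sequence (no repeats)"""
--     if count == 1:
--         return [start]
--     if count < 1:
--         return []
--     step = max(1, (end - start) // (count - 1))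
--     # last index still on the uncapped ramp: start + i*step <= end  iff  i <= (end-start)//step
--     k = min(count - 1, max(0, (end - start) // step))
--     ramp = [start + i * step for i in range(1, k + 1)]
--     return [start] + ramp + [end] * (count - 1 - k)
-- ===== Notes on version B (the rewrite author's own statement) =====
-- stated objective: alternative
-- what changed: Instead of iterating with a running 'current' accumulator that caps each increment, B computes the ramp cutoff index k = min(count-1, max(0,(end-start)//step)) arithmetically and builds the result as [start] + an uncapped arithmetic ramp + a replicated tail of end values. The replicated tail and list-level ramp construction avoid A's per-element min/append loop.
import Mathlib
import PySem

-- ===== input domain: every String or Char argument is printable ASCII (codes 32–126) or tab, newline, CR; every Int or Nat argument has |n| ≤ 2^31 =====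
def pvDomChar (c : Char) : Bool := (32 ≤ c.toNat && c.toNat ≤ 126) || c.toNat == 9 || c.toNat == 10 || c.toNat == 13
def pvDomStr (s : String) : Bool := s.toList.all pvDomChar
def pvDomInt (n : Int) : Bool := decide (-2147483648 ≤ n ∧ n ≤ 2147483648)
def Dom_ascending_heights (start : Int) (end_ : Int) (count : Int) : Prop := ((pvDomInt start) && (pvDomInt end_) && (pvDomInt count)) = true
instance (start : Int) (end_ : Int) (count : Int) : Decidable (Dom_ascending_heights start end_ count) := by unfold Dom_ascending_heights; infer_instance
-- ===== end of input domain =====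

-- B replaces A's capped-increment accumulator loop by arithmetic: it computes the ramp
-- cutoff index k directly and builds [start] ++ uncapped ramp ++ replicated end tail;
-- objective: alternative decomposition, same cost.

-- ===== PORT A =====
def ascending_heights (start : Int) (end_ : Int) (count : Int) : List Int :=
  if count == 1 then [start]
  else
    let step := max 1 (PySem.Int.floordiv (end_ - start) (count - 1))
    let res := (PySem.List.pyRange 0 count 1).foldl
      (fun (st : List Int × Int) _ => (st.1 ++ [st.2], min (st.2 + step) end_))
      ([], start)
    res.1

-- ===== PORT B =====
def ascending_heights_alt (start : Int) (end_ : Int) (count : Int) : List Int :=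
  if count == 1 then [start]
  else if count < 1 then []
  else
    let step := max 1 (PySem.Int.floordiv (end_ - start) (count - 1))
    let k := min (count - 1) (max 0 (PySem.Int.floordiv (end_ - start) step))
    let ramp := (PySem.List.pyRange 1 (k + 1) 1).map (fun i => start + i * step)
    [start] ++ ramp ++ List.replicate (count - 1 - k).toNat end_

-- ===== PRECONDITION & SPEC =====
def Spec_ascending_heights (start : Int) (end_ : Int) (count : Int) (out : List Int) : Prop := out = ascending_heights_alt start end_ count
instance (start : Int) (end_ : Int) (count : Int) (out : List Int) : Decidable (Spec_ascending_heights start end_ count out) := by unfold Spec_ascending_heights; infer_instance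

-- ===== CLAIM (what is proved, stated in full; the proofs are below) =====
def Claim_equal_ascending_heights : Prop := ∀ (start : Int) (end_ : Int) (count : Int), Dom_ascending_heights start end_ count → Spec_ascending_heights start end_ count (ascending_heights start end_ count)

-- ===== LEMMAS AND PROOFS =====

-- the closed-form value of A's `current` after j iterations
def pvF (start end_ step : Int) (j : Int) : Int :=
  if j = 0 then start else min (start + j * step) end_

-- the list A's loop produces from current value c in n iterations
def pvSeq (end_ step : Int) (c : Int) : Nat → List Int
  | 0 => []
  | n+1 => c :: pvSeq end_ step (min (c + step) end_) n

theorem pvFold_eq (end_ step : Int) :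
    ∀ (l : List Int) (acc : List Int) (c : Int),
    (l.foldl (fun (st : List Int × Int) _ => (st.1 ++ [st.2], min (st.2 + step) end_))
      (acc, c)).1 = acc ++ pvSeq end_ step c l.length := by
  intro l
  induction l with
  | nil => intro acc c; simp [pvSeq]
  | cons x xs ih =>
      intro acc c
      simp only [List.foldl_cons, List.length_cons, pvSeq, ih]
      simp

theorem pvF_step (start end_ step : Int) (hstep : 1 ≤ step) (j : Int) (hj : 0 ≤ j) :
    min (pvF start end_ step j + step) end_ = pvF start end_ step (j + 1) := by
  unfold pvF
  have hj2 : j + 1 ≠ 0 := by omega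
  rcases eq_or_ne j 0 with h | h
  · simp [h]
  · simp only [h, hj2, if_false]
    have hmul : (j + 1) * step = j * step + step := by ring
    omega

theorem pvSeq_eq_map (start end_ step : Int) (hstep : 1 ≤ step) :
    ∀ (n : Nat) (j : Int), 0 ≤ j →
    pvSeq end_ step (pvF start end_ step j) n
      = (PySem.List.pyRange j (j + n) 1).map (pvF start end_ step) := by
  intro n
  induction n with
  | zero =>
      intro j hj
      simp [pvSeq, PySem.List.pyRange_one_eq_nil (le_refl j)]
  | succ n ih =>
      intro j hj
      have hlt : j < j + (n + 1 : Nat) := by push_cast; omega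
      rw [PySem.List.pyRange_one_cons hlt,
        show j + ((n + 1 : Nat) : Int) = (j + 1) + (n : Nat) by push_cast; ring]
      simp only [pvSeq, List.map_cons]
      rw [pvF_step start end_ step hstep j hj, ih (j + 1) (by omega)]

theorem ascending_heights_spec : Claim_equal_ascending_heights := by
  unfold Claim_equal_ascending_heights Spec_ascending_heights
  intro start end_ count _
  unfold ascending_heights ascending_heights_alt
  rcases eq_or_ne count 1 with h1 | h1
  · simp [h1]
  · simp only [beq_iff_eq, h1, if_false]
    by_cases hlt : count < 1
    · rw [pvFold_eq, PySem.List.pyRange_one_eq_nil (by omega)]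
      simp [hlt, pvSeq]
    · simp only [hlt, if_false]
      set step := max 1 (PySem.Int.floordiv (end_ - start) (count - 1)) with hstepdef
      have hs1 : 1 ≤ step := le_max_left _ _
      set q := PySem.Int.floordiv (end_ - start) step with hqdef
      have hq : q * step ≤ end_ - start ∧ end_ - start < (q + 1) * step :=
        (PySem.Int.floordiv_eq_iff_of_pos (by omega)).1 hqdef.symm
      set k := min (count - 1) (max 0 q) with hkdef
      -- A's side as a map of the closed form over the index range
      rw [pvFold_eq]
      have hlen : (PySem.List.pyRange 0 count 1).length = count.toNat := by
        rw [PySem.List.length_pyRange_one]; simp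
      have hc0 : pvF start end_ step 0 = start := by simp [pvF]
      rw [hlen, show (start : Int) = pvF start end_ step 0 from hc0.symm,
        pvSeq_eq_map start end_ step hs1 count.toNat 0 le_rfl,
        show (0 : Int) + (count.toNat : Int) = count by omega,
        PySem.List.pyRange_one_cons (by omega : (0:Int) < count)]
      simp only [List.map_cons, List.nil_append, hc0, zero_add]
      rw [show ([start] ++ _ ++ _ : List Int) = start :: ((PySem.List.pyRange 1 (k+1) 1).map (fun i => start + i * step) ++ List.replicate (count - 1 - k).toNat end_) by simp]
      congr 1
      -- split the index range at k+1
      rw [PySem.List.pyRange_one_append 1 (k + 1) count (by omega) (by omega), List.map_append]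
      congr 1
      · -- uncapped ramp part
        apply List.map_congr_left
        intro i hi
        have hmem := (PySem.List.mem_pyRange_one).1 hi
        have hiq : i ≤ q := by omega
        have hle : i * step ≤ q * step := mul_le_mul_of_nonneg_right hiq (by omega)
        simp only [pvF, show i ≠ 0 by omega, if_false]
        omega
      · -- capped tail: every element is end_
        rw [List.eq_replicate_iff]
        constructor
        · rw [List.length_map, PySem.List.length_pyRange_one]
          omega
        · intro b hb
          obtain ⟨i, hi, rfl⟩ := List.mem_map.1 hb
          have hmem := (PySem.List.mem_pyRange_one).1 hi
          have hqk : q + 1 ≤ i := by omega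
          have hle : (q + 1) * step ≤ i * step := mul_le_mul_of_nonneg_right hqk (by omega)
          simp only [pvF, show i ≠ 0 by omega, if_false]
          omega

-- ===== VERDICT =====
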